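-- pv_equiv track=rewrite | github.com/mistercrunch/rodent | rodent/actions.py | squeeze_in_license
-- ===== SOURCE A (Python) =====
-- SPECIAL_FIRST_LINES = ["#!", "# -*-", "from __future__ "]
--
-- def squeeze_in_license(file_content, commented_license_text):
--     """Skips shebang and adds license content"""
--     license_applied = False
--     newfile_lines = []
--     for line in file_content.split("\n"):
--         if not license_applied:
--             is_special_line = any(line.startswith(s) for s in SPECIAL_FIRST_LINES)
--             if not is_special_line:
--                 newfile_lines.append(commented_license_text)
--                 license_applied = True
--         newfile_lines.append(line)
--     return "\n".join(newfile_lines)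
-- ===== SOURCE B (Python) =====
-- SPECIAL_FIRST_LINES = ["#!", "# -*-", "from __future__ "]
--
-- def squeeze_in_license(file_content, commented_license_text):
--     """Skips shebang and adds license content"""
--     lines = file_content.split("\n")
--     idx = next((i for i, line in enumerate(lines)
--                 if not any(line.startswith(s) for s in SPECIAL_FIRST_LINES)),
--                None)
--     if idx is not None:
--         lines = lines[:idx] + [commented_license_text] + lines[idx:]
--     return "\n".join(lines)
-- ===== Notes on version B (the rewrite author's own statement) =====
-- stated objective: alternative
-- what changed: Replaces the single stateful loop carrying a license_applied flag and an output accumulator with a two-phase index-find-then-splice: locate the first non-special line with enumerate/next, then build the output by list slicing.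
import Mathlib
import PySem

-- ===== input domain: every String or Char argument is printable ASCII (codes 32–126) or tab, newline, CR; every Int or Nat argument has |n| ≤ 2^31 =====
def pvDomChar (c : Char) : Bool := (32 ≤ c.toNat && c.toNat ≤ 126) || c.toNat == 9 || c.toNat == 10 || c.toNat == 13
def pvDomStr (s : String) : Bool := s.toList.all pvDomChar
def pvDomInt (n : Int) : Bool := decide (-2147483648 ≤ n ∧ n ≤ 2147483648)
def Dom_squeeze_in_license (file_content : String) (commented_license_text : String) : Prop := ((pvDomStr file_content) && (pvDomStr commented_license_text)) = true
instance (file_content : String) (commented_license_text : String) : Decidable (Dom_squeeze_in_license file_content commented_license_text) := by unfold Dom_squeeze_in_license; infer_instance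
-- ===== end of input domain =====

-- B replaces A's stateful flag-and-accumulator loop by find-first-non-special-index then slice-splice (same cost; alternative decomposition).

-- ===== PORT A =====
-- SPECIAL_FIRST_LINES (module constant, shared by both versions)
def pvSpecialFirstLines : List (List Char) := ["#!".toList, "# -*-".toList, "from __future__ ".toList]

-- any(line.startswith(s) for s in SPECIAL_FIRST_LINES)
def pvIsSpecial (line : List Char) : Bool := pvSpecialFirstLines.any (fun s => PySem.Chars.startswith line s)

-- loop body of A over state (license_applied, newfile_lines)
def pvStepA (lic : List Char) (st : Bool × List (List Char)) (line : List Char) : Bool × List (List Char) :=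
  if st.1 = false then
    if pvIsSpecial line = false then (true, st.2 ++ [lic, line])
    else (st.1, st.2 ++ [line])
  else (st.1, st.2 ++ [line])

def squeeze_in_license (file_content : String) (commented_license_text : String) : String :=
  let res := (PySem.Chars.splitOn file_content.toList ['\n']).foldl (pvStepA commented_license_text.toList) (false, [])
  String.ofList (PySem.Chars.join ['\n'] res.2)

-- ===== PORT B =====
def squeeze_in_license_alt (file_content : String) (commented_license_text : String) : String :=
  let lines := PySem.Chars.splitOn file_content.toList ['\n']
  let newlines :=
    match lines.findIdx? (fun l => pvIsSpecial l = false) with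
    | some i => lines.take i ++ [commented_license_text.toList] ++ lines.drop i
    | none => lines
  String.ofList (PySem.Chars.join ['\n'] newlines)

-- ===== PRECONDITION & SPEC =====
def Spec_squeeze_in_license (file_content : String) (commented_license_text : String) (out : String) : Prop := out = squeeze_in_license_alt file_content commented_license_text
instance (file_content : String) (commented_license_text : String) (out : String) : Decidable (Spec_squeeze_in_license file_content commented_license_text out) := by unfold Spec_squeeze_in_license; infer_instance

-- ===== CLAIM (what is proved, stated in full; the proofs are below) =====
def Claim_equal_squeeze_in_license : Prop := ∀ (file_content : String) (commented_license_text : String), Dom_squeeze_in_license file_content commented_license_text → Spec_squeeze_in_license file_content commented_license_text (squeeze_in_license file_content commented_license_text)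

-- ===== LEMMAS AND PROOFS =====

-- once the license is applied, A's loop only appends the remaining lines
theorem pvFoldA_true (lic : List Char) (ls : List (List Char)) (acc : List (List Char)) :
    ls.foldl (pvStepA lic) (true, acc) = (true, acc ++ ls) := by
  induction ls generalizing acc with
  | nil => simp
  | cons l t ih => simp [pvStepA, ih]

-- A's loop from the unapplied state computes exactly B's splice
theorem pvFoldA_false (lic : List Char) (ls : List (List Char)) (acc : List (List Char)) :
    (ls.foldl (pvStepA lic) (false, acc)).2 =
      acc ++ (match ls.findIdx? (fun l => pvIsSpecial l = false) with
              | some i => ls.take i ++ [lic] ++ ls.drop i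
              | none => ls) := by
  induction ls generalizing acc with
  | nil => simp
  | cons l t ih =>
    by_cases h : pvIsSpecial l = false
    · simp [List.foldl_cons, pvStepA, h, pvFoldA_true, List.findIdx?_cons]
    · simp only [List.foldl_cons, pvStepA, h, Bool.true_eq_false, reduceIte]
      rw [ih]
      simp only [List.findIdx?_cons, h]
      cases ht : t.findIdx? (fun l => pvIsSpecial l = false) <;> simp

-- ===== VERDICT (by name: the statement is the Claim_ definition above) =====
theorem squeeze_in_license_spec : Claim_equal_squeeze_in_license := by
  intro fc lic _
  simp only [Spec_squeeze_in_license, squeeze_in_license, squeeze_in_license_alt,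
    pvFoldA_false, List.nil_append]
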